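-- pv_equiv track=rewrite | github.com/Mrawan-Nabil/Project | src/map_data.py | calculate_resources
-- ===== SOURCE A (Python) =====
-- def calculate_resources(entity_map: list) -> dict:
--     """Scan *entity_map* and count hospital resources by symbol.
--
--     Counting rules
--     --------------
--     beds            'E'  — exam tables / patient beds
--     mris            'M'  — MRI scanner machines
--     doctors         'X' + 'S' + 'G'  — doctors, surgeons (both genders)
--     icus            'O'  — medical monitors (designate ICU / high-dependency spots)
--     operating_rooms 'L'  — surgical lights (one per operating theatre bay)
--
--     Returns
--     -------
--     dict with keys: beds, mris, doctors, icus, operating_rooms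
--     """
--     counts = {
--         'beds':            0,
--         'mris':            0,
--         'doctors':         0,
--         'icus':            0,
--         'operating_rooms': 0,
--     }
--
--     for row in entity_map:
--         for cell in row:
--             if cell == 'E':
--                 counts['beds']            += 1
--             elif cell == 'M':
--                 counts['mris']            += 1
--             elif cell in ('X', 'S', 'G'):
--                 counts['doctors']         += 1
--             elif cell == 'O':
--                 counts['icus']            += 1
--             elif cell == 'L':
--                 counts['operating_rooms'] += 1
--
--     return counts
-- ===== SOURCE B (Python) =====
-- def calculate_resources(entity_map: list) -> dict:
--     """Staged passes: each category is totalled by its own row.count() scans,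
--     no per-cell branching or running accumulator dict."""
--     def total(*symbols):
--         return sum(row.count(s) for row in entity_map for s in symbols)
--     return {
--         'beds':            total('E'),
--         'mris':            total('M'),
--         'doctors':         total('X', 'S', 'G'),
--         'icus':            total('O'),
--         'operating_rooms': total('L'),
--     }
-- ===== Notes on version B (the rewrite author's own statement) =====
-- stated objective: alternative
-- what changed: Replaced A's single pass with a per-cell five-way branch into a running dict by staged per-symbol passes: each category is the sum of row.count(symbol) over the rows, assembled directly into the result dict.
import Mathlib
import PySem

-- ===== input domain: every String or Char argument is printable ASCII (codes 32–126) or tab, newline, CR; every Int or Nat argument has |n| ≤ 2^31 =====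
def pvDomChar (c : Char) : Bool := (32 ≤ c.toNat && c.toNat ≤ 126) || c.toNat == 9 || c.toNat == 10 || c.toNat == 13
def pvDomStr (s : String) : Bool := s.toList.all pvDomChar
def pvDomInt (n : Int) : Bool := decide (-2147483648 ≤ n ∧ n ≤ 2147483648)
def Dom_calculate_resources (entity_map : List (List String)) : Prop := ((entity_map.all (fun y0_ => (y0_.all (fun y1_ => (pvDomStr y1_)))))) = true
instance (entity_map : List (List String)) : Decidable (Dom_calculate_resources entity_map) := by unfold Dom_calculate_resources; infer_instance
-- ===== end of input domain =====

-- B replaces A's per-cell five-way branch into a running dict by staged per-symbol passes (row.count sums per category); objective: alternative.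

-- ===== PORT A =====
-- one cell of A's if/elif chain, updating the running counts dict
def crStep (counts : PySem.Dict String Int) (cell : String) : PySem.Dict String Int :=
  if cell == "E" then counts.modify "beds" 0 (· + 1)
  else if cell == "M" then counts.modify "mris" 0 (· + 1)
  else if cell == "X" || cell == "S" || cell == "G" then counts.modify "doctors" 0 (· + 1)
  else if cell == "O" then counts.modify "icus" 0 (· + 1)
  else if cell == "L" then counts.modify "operating_rooms" 0 (· + 1)
  else counts

def calculate_resources (entity_map : List (List String)) : List (String × Int) :=
  let counts : PySem.Dict String Int :=
    PySem.Dict.ofList [("beds", 0), ("mris", 0), ("doctors", 0), ("icus", 0), ("operating_rooms", 0)]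
  (entity_map.foldl (fun counts row => row.foldl crStep counts) counts).items

-- ===== PORT B =====
-- total(*symbols) = sum(row.count(s) for row in entity_map for s in symbols)
def crTotal (entity_map : List (List String)) (syms : List String) : Int :=
  (entity_map.map (fun row => (syms.map (fun s => (row.count s : Int))).sum)).sum

def calculate_resources_alt (entity_map : List (List String)) : List (String × Int) :=
  [("beds", crTotal entity_map ["E"]),
   ("mris", crTotal entity_map ["M"]),
   ("doctors", crTotal entity_map ["X", "S", "G"]),
   ("icus", crTotal entity_map ["O"]),
   ("operating_rooms", crTotal entity_map ["L"])]

-- ===== PRECONDITION & SPEC =====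
def Spec_calculate_resources (entity_map : List (List String)) (out : List (String × Int)) : Prop := out = calculate_resources_alt entity_map
instance (entity_map : List (List String)) (out : List (String × Int)) : Decidable (Spec_calculate_resources entity_map out) := by unfold Spec_calculate_resources; infer_instance

-- ===== CLAIM (what is proved, stated in full; the proofs are below) =====
def Claim_equal_calculate_resources : Prop := ∀ (entity_map : List (List String)), Dom_calculate_resources entity_map → Spec_calculate_resources entity_map (calculate_resources entity_map)

-- ===== LEMMAS AND PROOFS =====

def crKeys : List String := ["beds", "mris", "doctors", "icus", "operating_rooms"]

theorem crStep_keys (d : PySem.Dict String Int) (c : String) (h : d.keys = crKeys) :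
    (crStep d c).keys = crKeys := by
  have hc : ∀ k : String, k ∈ crKeys → d.contains k = true := by
    intro k hk
    rw [PySem.Dict.contains_iff_mem_keys, h]; exact hk
  unfold crStep
  split_ifs <;>
    simp_all [PySem.Dict.keys_modify, PySem.Dict.keys_insert_of_contains, crKeys]

theorem foldl_keys (cells : List String) (d : PySem.Dict String Int) (h : d.keys = crKeys) :
    (cells.foldl crStep d).keys = crKeys := by
  induction cells generalizing d with
  | nil => simpa using h
  | cons c rest ih => exact ih _ (crStep_keys d c h)

theorem foldl_beds (cells : List String) (d : PySem.Dict String Int) :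
    (cells.foldl crStep d).getD "beds" 0 = d.getD "beds" 0 + cells.count "E" := by
  induction cells generalizing d with
  | nil => simp
  | cons c rest ih =>
    rw [List.foldl_cons, ih, List.count_cons]
    unfold crStep
    split_ifs with h1 h2 h3 h4 h5 <;>
      simp_all [PySem.Dict.getD_modify] <;> omega

theorem foldl_mris (cells : List String) (d : PySem.Dict String Int) :
    (cells.foldl crStep d).getD "mris" 0 = d.getD "mris" 0 + cells.count "M" := by
  induction cells generalizing d with
  | nil => simp
  | cons c rest ih =>
    rw [List.foldl_cons, ih, List.count_cons]
    unfold crStep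
    split_ifs with h1 h2 h3 h4 h5 <;>
      simp_all [PySem.Dict.getD_modify] <;> omega

theorem foldl_doctors (cells : List String) (d : PySem.Dict String Int) :
    (cells.foldl crStep d).getD "doctors" 0 =
      d.getD "doctors" 0 + cells.count "X" + cells.count "S" + cells.count "G" := by
  induction cells generalizing d with
  | nil => simp
  | cons c rest ih =>
    rw [List.foldl_cons, ih]
    simp only [List.count_cons]
    unfold crStep
    split_ifs with h1 h2 h3 h4 h5 <;>
      simp_all [PySem.Dict.getD_modify] <;> omega

theorem foldl_icus (cells : List String) (d : PySem.Dict String Int) :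
    (cells.foldl crStep d).getD "icus" 0 = d.getD "icus" 0 + cells.count "O" := by
  induction cells generalizing d with
  | nil => simp
  | cons c rest ih =>
    rw [List.foldl_cons, ih, List.count_cons]
    unfold crStep
    split_ifs with h1 h2 h3 h4 h5 <;>
      simp_all [PySem.Dict.getD_modify] <;> omega

theorem foldl_oprooms (cells : List String) (d : PySem.Dict String Int) :
    (cells.foldl crStep d).getD "operating_rooms" 0 = d.getD "operating_rooms" 0 + cells.count "L" := by
  induction cells generalizing d with
  | nil => simp
  | cons c rest ih =>
    rw [List.foldl_cons, ih, List.count_cons]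
    unfold crStep
    split_ifs with h1 h2 h3 h4 h5 <;>
      simp_all [PySem.Dict.getD_modify] <;> omega

theorem crTotal_eq (m : List (List String)) (syms : List String) :
    crTotal m syms = (syms.map (fun s => ((m.flatMap (fun r => r)).count s : Int))).sum := by
  induction m with
  | nil => simp [crTotal]
  | cons row rest ih =>
    have : crTotal (row :: rest) syms
        = (syms.map (fun s => (row.count s : Int))).sum + crTotal rest syms := by
      simp [crTotal]
    rw [this, ih]
    have hsum : ∀ (f g : String → Int),
        (syms.map (fun s => f s + g s)).sum = (syms.map f).sum + (syms.map g).sum := by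
      intro f g
      induction syms with
      | nil => simp
      | cons s rest ih2 => simp [ih2]; ring
    simp only [List.flatMap_cons, List.count_append]
    rw [← hsum]
    push_cast
    rfl

-- ===== VERDICT (by name: the statement is the Claim_ definition above) =====
theorem calculate_resources_spec : Claim_equal_calculate_resources := by
  intro m _
  unfold Spec_calculate_resources
  simp only [calculate_resources, calculate_resources_alt]
  have hflat : m.foldl (fun counts row => row.foldl crStep counts)
      (PySem.Dict.ofList [("beds", 0), ("mris", 0), ("doctors", 0), ("icus", 0), ("operating_rooms", 0)])
      = (m.flatMap (fun r => r)).foldl crStep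
      (PySem.Dict.ofList [("beds", 0), ("mris", 0), ("doctors", 0), ("icus", 0), ("operating_rooms", 0)]) := by
    rw [List.foldl_flatMap]
  rw [hflat]
  set init : PySem.Dict String Int :=
    PySem.Dict.ofList [("beds", 0), ("mris", 0), ("doctors", 0), ("icus", 0), ("operating_rooms", 0)] with hinit
  set flat := m.flatMap (fun r => r) with hf
  have hkeys : (flat.foldl crStep init).keys = crKeys := by
    apply foldl_keys; rw [hinit]; decide
  have hnd : (flat.foldl crStep init).keys.Nodup := by rw [hkeys]; decide
  rw [PySem.Dict.items_eq_map_keys _ hnd 0, hkeys]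
  simp only [crKeys, List.map_cons, List.map_nil]
  rw [foldl_beds, foldl_mris, foldl_doctors, foldl_icus, foldl_oprooms]
  simp only [crTotal_eq, ← hf, List.map_cons, List.map_nil, List.sum_cons, List.sum_nil]
  simp [hinit]
  refine ⟨by decide, by decide, ?_, by decide, by decide⟩
  have h0 : (PySem.Dict.ofList [("beds", (0:Int)), ("mris", 0), ("doctors", 0), ("icus", 0), ("operating_rooms", 0)]).getD "doctors" 0 = 0 := by decide
  rw [h0]; ring
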